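-- pv_equiv track=rewrite | github.com/Lexseal/cube-solver | rank.py | ud_edges
-- ===== SOURCE A (Python) =====
-- import math
--
-- def ud_edges(egs):
--     '''
--     egs is a set of 12 numbers ranging from 0 to 11
--     we are only interested in entries that are between 4-7
--     '''
--     start = False
--     k = -1
--     sum = 0
--     for n, eg in enumerate(egs):
--         if eg >= 4 and eg <= 7:
--             start = True
--             k += 1
--         elif start:
--             sum += math.comb(n, k)
--     return sum
-- ===== SOURCE B (Python) =====
-- import math
--
-- def ud_edges(egs):
--     ps = [n for n, eg in enumerate(egs) if 4 <= eg <= 7]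
--     if not ps:
--         return 0
--     qs = ps + [len(egs)]
--     return sum(math.comb(qs[j + 1], j + 1) - math.comb(qs[j] + 1, j + 1)
--                for j in range(len(ps)))
-- ===== Notes on version B (the rewrite author's own statement) =====
-- stated objective: alternative
-- what changed: Replaces A's per-position state machine (start/k/sum accumulating comb(n,k) at every non-selected position) by a closed-form telescoped binomial sum over only the selected positions, via the hockey-stick identity with len(egs) as sentinel.
import Mathlib
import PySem

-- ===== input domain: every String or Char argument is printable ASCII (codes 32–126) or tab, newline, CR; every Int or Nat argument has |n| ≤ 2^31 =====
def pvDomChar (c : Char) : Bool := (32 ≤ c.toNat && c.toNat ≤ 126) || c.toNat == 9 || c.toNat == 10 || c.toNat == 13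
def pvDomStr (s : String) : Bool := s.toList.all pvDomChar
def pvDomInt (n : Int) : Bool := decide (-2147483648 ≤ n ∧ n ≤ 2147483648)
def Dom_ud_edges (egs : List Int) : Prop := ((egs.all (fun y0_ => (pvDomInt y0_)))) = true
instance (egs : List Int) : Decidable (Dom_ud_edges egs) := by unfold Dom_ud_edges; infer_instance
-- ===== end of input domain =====

-- B replaces A's per-position comb accumulation by a closed-form telescoped (hockey-stick)
-- binomial sum over only the selected positions (objective: alternative).

-- ===== PORT A =====
-- literal transliteration of A's enumerate loop over state (start, k, sum);
-- math.comb(n, k) with n, k ≥ 0 at every evaluated call is Nat.choose on the toNats (exact there)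
def ud_edges (egs : List Int) : Int :=
  ((PySem.List.enumerate egs 0).foldl
    (fun (s : Bool × Int × Int) (p : Int × Int) =>
      if 4 ≤ p.2 ∧ p.2 ≤ 7 then (true, s.2.1 + 1, s.2.2)
      else if s.1 = true then (s.1, s.2.1, s.2.2 + (Nat.choose p.1.toNat s.2.1.toNat : Int))
      else s)
    (false, -1, 0)).2.2

-- ===== PORT B =====
-- Source B's list comprehension: indices of the in-range entries
def pvSel (egs : List Int) : List Int :=
  ((PySem.List.enumerate egs 0).filter (fun p => decide (4 ≤ p.2 ∧ p.2 ≤ 7))).map Prod.fst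

-- Source B: telescoped binomial sum over qs = ps + [len(egs)]; qs[j] indexing is by in-range
-- indices (j, j+1 < len(qs)), ported as getD; comb of the nonnegative ints via toNat (exact there)
def ud_edges_alt (egs : List Int) : Int :=
  let ps := pvSel egs
  if ps = [] then 0
  else
    let qs := ps ++ [(egs.length : Int)]
    (List.range ps.length).foldl
      (fun acc j =>
        acc + ((Nat.choose (qs.getD (j + 1) 0).toNat (j + 1) : Int)
             - (Nat.choose ((qs.getD j 0).toNat + 1) (j + 1) : Int))) 0

-- ===== PRECONDITION & SPEC =====
def Spec_ud_edges (egs : List Int) (out : Int) : Prop := out = ud_edges_alt egs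
instance (egs : List Int) (out : Int) : Decidable (Spec_ud_edges egs out) := by unfold Spec_ud_edges; infer_instance

-- ===== CLAIM (what is proved, stated in full; the proofs are below) =====
def Claim_equal_ud_edges : Prop := ∀ (egs : List Int), Dom_ud_edges egs → Spec_ud_edges egs (ud_edges egs)

-- ===== LEMMAS AND PROOFS =====

-- one summand of B's telescoped sum, with sentinel list qs
def pvT (qs : List Int) (j : Nat) : Int :=
  (Nat.choose (qs.getD (j + 1) 0).toNat (j + 1) : Int)
    - (Nat.choose ((qs.getD j 0).toNat + 1) (j + 1) : Int)

-- B's sum as a Finset sum over the selected index list ps and sentinel L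
def pvS (ps : List Int) (L : Int) : Int :=
  ∑ j ∈ Finset.range ps.length, pvT (ps ++ [L]) j

theorem pv_foldl_to_sum (f : Nat → Int) (n : Nat) (a : Int) :
    (List.range n).foldl (fun acc j => acc + f j) a = a + ∑ j ∈ Finset.range n, f j := by
  induction n generalizing a with
  | zero => simp
  | succ m ih =>
      rw [List.range_succ, List.foldl_append, ih, Finset.sum_range_succ]
      simp [add_assoc]

theorem pv_alt_eq_S (xs : List Int) :
    ud_edges_alt xs = pvS (pvSel xs) (xs.length : Int) := by
  unfold ud_edges_alt
  by_cases h : pvSel xs = []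
  · simp [h, pvS]
  · rw [if_neg h, pv_foldl_to_sum]
    simp [pvS, pvT]

theorem pv_sel_append (xs : List Int) (x : Int) :
    pvSel (xs ++ [x])
      = pvSel xs ++ (if 4 ≤ x ∧ x ≤ 7 then [(xs.length : Int)] else []) := by
  unfold pvSel
  rw [PySem.List.enumerate_append, List.filter_append, List.map_append]
  simp [PySem.List.enumerate_cons, PySem.List.enumerate_nil]
  split_ifs with h <;> simp [h]

theorem pv_S_in (ps : List Int) (L : Nat) :
    pvS (ps ++ [(L : Int)]) ((L : Int) + 1) = pvS ps (L : Int) := by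
  unfold pvS
  rw [List.length_append]
  simp only [List.length_cons, List.length_nil]
  rw [Finset.sum_range_succ]
  have hterm : pvT (ps ++ [(L : Int)] ++ [((L : Int) + 1)]) ps.length = 0 := by
    unfold pvT
    rw [List.getD_append_right _ _ _ _ (by simp), List.getD_append _ _ _ _ (by simp),
        List.getD_append_right _ _ _ _ (by simp)]
    simp
  have hcongr : ∀ j ∈ Finset.range ps.length,
      pvT (ps ++ [(L : Int)] ++ [((L : Int) + 1)]) j = pvT (ps ++ [(L : Int)]) j := by
    intro j hj
    rw [Finset.mem_range] at hj
    unfold pvT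
    rw [List.getD_append (ps ++ [(L : Int)]) _ _ (j + 1) (by simp; omega),
        List.getD_append (ps ++ [(L : Int)]) _ _ j (by simp; omega)]
  rw [Finset.sum_congr rfl hcongr, hterm, add_zero]

theorem pv_S_out (ps : List Int) (L : Nat) (h : ps ≠ []) :
    pvS ps ((L : Int) + 1) = pvS ps (L : Int) + (Nat.choose L (ps.length - 1) : Int) := by
  obtain ⟨m, hm⟩ : ∃ m, ps.length = m + 1 := by
    cases ps with
    | nil => exact absurd rfl h
    | cons a t => exact ⟨t.length, rfl⟩
  unfold pvS
  rw [hm, Finset.sum_range_succ, Finset.sum_range_succ]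
  have hcongr : ∀ j ∈ Finset.range m,
      pvT (ps ++ [((L : Int) + 1)]) j = pvT (ps ++ [(L : Int)]) j := by
    intro j hj
    rw [Finset.mem_range] at hj
    unfold pvT
    rw [List.getD_append _ _ _ (j + 1) (by omega), List.getD_append _ _ _ j (by omega),
        List.getD_append _ _ _ (j + 1) (by omega), List.getD_append _ _ _ j (by omega)]
  rw [Finset.sum_congr rfl hcongr]
  have hlast1 : pvT (ps ++ [((L : Int) + 1)]) m
      = (Nat.choose (L + 1) (m + 1) : Int)
        - (Nat.choose ((ps.getD m 0).toNat + 1) (m + 1) : Int) := by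
    unfold pvT
    rw [List.getD_append_right _ _ _ (m + 1) (by omega), List.getD_append _ _ _ m (by omega)]
    have : ((L : Int) + 1).toNat = L + 1 := by omega
    simp [hm, this]
  have hlast2 : pvT (ps ++ [(L : Int)]) m
      = (Nat.choose L (m + 1) : Int)
        - (Nat.choose ((ps.getD m 0).toNat + 1) (m + 1) : Int) := by
    unfold pvT
    rw [List.getD_append_right _ _ _ (m + 1) (by omega), List.getD_append _ _ _ m (by omega)]
    simp [hm]
  rw [hlast1, hlast2]
  have hp : Nat.choose (L + 1) (m + 1) = Nat.choose L m + Nat.choose L (m + 1) :=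
    Nat.choose_succ_succ' L m
  simp only [Nat.add_sub_cancel]
  push_cast [hp]
  ring

-- characterisation of A's loop state after any prefix (proved by appending one element)
theorem pv_stateA (xs : List Int) :
    (PySem.List.enumerate xs 0).foldl
      (fun (s : Bool × Int × Int) (p : Int × Int) =>
        if 4 ≤ p.2 ∧ p.2 ≤ 7 then (true, s.2.1 + 1, s.2.2)
        else if s.1 = true then (s.1, s.2.1, s.2.2 + (Nat.choose p.1.toNat s.2.1.toNat : Int))
        else s)
      (false, -1, 0)
    = (!(pvSel xs).isEmpty, ((pvSel xs).length : Int) - 1, pvS (pvSel xs) (xs.length : Int)) := by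
  induction xs using List.reverseRecOn with
  | nil => simp [PySem.List.enumerate_nil, pvSel, pvS]
  | append_singleton xs x ih =>
      rw [PySem.List.enumerate_append, List.foldl_append, ih,
          PySem.List.enumerate_cons, PySem.List.enumerate_nil]
      simp only [List.foldl_cons, List.foldl_nil]
      rw [pv_sel_append]
      by_cases hx : 4 ≤ x ∧ x ≤ 7
      · rw [if_pos hx, if_pos hx]
        have hS := pv_S_in (pvSel xs) xs.length
        simp only [List.length_append, List.length_cons, List.length_nil, Prod.mk.injEq]
        refine ⟨by simp, by push_cast; ring, ?_⟩
        rw [show ((xs.length + (0 + 1) : Nat) : Int) = (xs.length : Int) + 1 by push_cast; ring]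
        exact hS.symm
      · rw [if_neg hx, if_neg hx]
        simp only [List.append_nil]
        by_cases hps : pvSel xs = []
        · simp only [hps]
          simp [pvS]
        · have hne : (!(pvSel xs).isEmpty) = true := by
            simp [hps]
          rw [hne, if_pos rfl]
          simp only [Prod.mk.injEq, List.length_append, List.length_cons, List.length_nil]
          refine ⟨trivial, trivial, ?_⟩
          rw [show ((xs.length + (0 + 1) : Nat) : Int) = (xs.length : Int) + 1 by push_cast; ring]
          rw [pv_S_out (pvSel xs) xs.length hps]
          have h1 : ((0 : Int) + (xs.length : Int)).toNat = xs.length := by omega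
          have h2 : (((pvSel xs).length : Int) - 1).toNat = (pvSel xs).length - 1 := by omega
          rw [h1, h2]

-- ===== VERDICT (by name: the statement is the Claim_ definition above) =====
theorem ud_edges_spec : Claim_equal_ud_edges := by
  intro egs _
  unfold Spec_ud_edges ud_edges
  rw [pv_stateA, pv_alt_eq_S]
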